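-- pv_equiv track=rewrite | github.com/PedroRAlberti/estudo | prog_impatech/prog_1/lista-8/8_entregar/8-1_3.py | is_in_previous_elements
-- ===== SOURCE A (Python) =====
-- def is_in_previous_elements(a,b,c):
--     # "a" é o numero de itens na lista, "b" o numero em que se leva em conta antes de comprar e "c" a lista propriamente
--     lista = []
--     contador = 0
--     #caso o numero de itens que se leva em conta seja maior que o numero de itens na lista, todos os itens serao comprados
--     if a <= b:
--         return a
--     #a ideia basicamente é que ao preencher a lista dos que se leva em conta, sempre que se acha um item que será comprado, ele será adicionado na e o primeiro item da lista será removido, e toda vez que se adiciona um item, o contador é somado 1, bastando assim retornar o contador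
--     for i in range (a):
--         if len(lista) == b:
--             if c[i] not in lista:
--                 lista.append(c[i])
--                 contador += 1
--                 lista.remove(lista[0])
--             continue
--         lista.append(c[i])
--         contador += 1
--     return contador
-- ===== SOURCE B (Python) =====
-- def is_in_previous_elements(a, b, c):
--     if a <= b:
--         return a
--     # pass 1: predecessor links — prev[i] = index of the previous occurrence of c[i], or -1
--     prev = []
--     seen = {}
--     for i in range(a):
--         x = c[i]
--         prev.append(seen.get(x, -1))
--         seen[x] = i
--     # pass 2: chase the links; ev[i] = event number given to position i if it is bought,
--     # otherwise the inherited event number of the last bought occurrence of c[i];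
--     # position i is bought iff that event has already left the window of the last b events
--     ev = []
--     t = 0
--     for i in range(a):
--         j = prev[i]
--         last = -1 if j < 0 else ev[j]
--         if t < b or last <= t - b:
--             t += 1
--             ev.append(t)
--         else:
--             ev.append(last)
--     return t
-- ===== Notes on version B (the rewrite author's own statement) =====
-- stated objective: faster
-- what changed: A simulates the window in one pass with an explicit list, a membership scan and a remove per element; B makes two staged passes: pass 1 builds predecessor links (previous occurrence of each value), pass 2 chases those links through a per-position event array, so no window and no membership test remain.
import Mathlib
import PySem

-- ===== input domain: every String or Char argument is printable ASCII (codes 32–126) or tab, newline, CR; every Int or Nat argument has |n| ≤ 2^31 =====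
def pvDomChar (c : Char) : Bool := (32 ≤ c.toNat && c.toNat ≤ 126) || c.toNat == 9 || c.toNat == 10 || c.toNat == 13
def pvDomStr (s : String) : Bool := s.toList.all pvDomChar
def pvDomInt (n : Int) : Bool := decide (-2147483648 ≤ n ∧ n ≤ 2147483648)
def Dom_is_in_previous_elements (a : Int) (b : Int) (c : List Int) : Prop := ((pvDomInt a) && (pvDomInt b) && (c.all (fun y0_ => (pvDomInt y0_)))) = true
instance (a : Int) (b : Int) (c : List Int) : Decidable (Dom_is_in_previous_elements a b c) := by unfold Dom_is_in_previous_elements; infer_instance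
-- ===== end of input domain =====

-- B replaces A's one-pass explicit-window simulation (membership scan + remove per
-- element) by two staged passes: pass 1 builds predecessor links (previous occurrence
-- of each value), pass 2 chases the links through a per-position event array — no
-- window and no membership test remain.  Same return value on Pre_.

-- ===== PORT A =====
-- loop body of A: one iteration over the current element x = c[i]
def pvStepA (b : Int) (st : List Int × Int) (x : Int) : List Int × Int :=
  if (st.1.length : Int) = b then
    if x ∈ st.1 then st
    else
      -- lista.append(c[i]); contador += 1; lista.remove(lista[0])
      let lista2 := st.1 ++ [x]
      ((PySem.List.remove? lista2 (lista2.headD 0)).getD lista2, st.2 + 1)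
  else (st.1 ++ [x], st.2 + 1)

def is_in_previous_elements (a : Int) (b : Int) (c : List Int) : Int :=
  if a ≤ b then a
  else
    -- c[i] is in range for every i in range(a) under Pre_ (a ≤ len c)
    ((PySem.List.pyRange 0 a 1).foldl
      (fun st i => pvStepA b st (PySem.List.pyGetD c i 0)) ([], 0)).2

-- ===== PORT B =====
-- pass-1 body: prev.append(seen.get(x, -1)); seen[x] = i
def pvLink (c : List Int) (st : List Int × PySem.Dict Int Int) (i : Int) : List Int × PySem.Dict Int Int :=
  let x := PySem.List.pyGetD c i 0
  (st.1 ++ [st.2.getD x (-1)], st.2.insert x i)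

-- pass-2 body, split like the Python: last = -1 if j < 0 else ev[j]; then count or inherit
def pvChaseLast (b : Int) (st : List Int × Int) (last : Int) : List Int × Int :=
  if st.2 < b ∨ last ≤ st.2 - b then (st.1 ++ [st.2 + 1], st.2 + 1)
  else (st.1 ++ [last], st.2)

def pvChase (b : Int) (prev : List Int) (st : List Int × Int) (i : Int) : List Int × Int :=
  pvChaseLast b st
    (if PySem.List.pyGetD prev i 0 < 0 then -1
     else PySem.List.pyGetD st.1 (PySem.List.pyGetD prev i 0) 0)

def is_in_previous_elements_alt (a : Int) (b : Int) (c : List Int) : Int :=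
  if a ≤ b then a
  else
    ((PySem.List.pyRange 0 a 1).foldl
      (pvChase b ((PySem.List.pyRange 0 a 1).foldl (pvLink c) ([], PySem.Dict.empty)).1)
      ([], 0)).2

-- ===== PRECONDITION & SPEC =====
-- Pre_ excludes exactly the inputs where Python A raises IndexError (a > b and a > len(c)).
def Pre_is_in_previous_elements (a : Int) (b : Int) (c : List Int) : Prop :=
  a ≤ b ∨ a ≤ (c.length : Int)
instance (a : Int) (b : Int) (c : List Int) : Decidable (Pre_is_in_previous_elements a b c) := by
  unfold Pre_is_in_previous_elements; infer_instance

def pvWitness_is_in_previous_elements : Int × Int × List Int := (5, 2, [1, 2, 1, 3, 2])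

def Spec_is_in_previous_elements (a : Int) (b : Int) (c : List Int) (out : Int) : Prop := out = is_in_previous_elements_alt a b c
instance (a : Int) (b : Int) (c : List Int) (out : Int) : Decidable (Spec_is_in_previous_elements a b c out) := by unfold Spec_is_in_previous_elements; infer_instance

-- ===== CLAIM (what is proved, stated in full; the proofs are below) =====
def Claim_equal_is_in_previous_elements : Prop := ∀ (a : Int) (b : Int) (c : List Int), Dom_is_in_previous_elements a b c → Pre_is_in_previous_elements a b c → Spec_is_in_previous_elements a b c (is_in_previous_elements a b c)

-- ===== LEMMAS AND PROOFS =====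

-- proof-side model: a dict of last-counted event numbers; both ports are proved equal to it
def pvStepM (b : Int) (st : PySem.Dict Int Int × Int) (x : Int) : PySem.Dict Int Int × Int :=
  if st.2 < b ∨ st.1.getD x (-1) ≤ st.2 - b then (st.1.insert x (st.2 + 1), st.2 + 1)
  else st

-- removing lista[0] from the nonempty list lista ++ [x] is its tail
theorem pvRemoveHead (l : List Int) (x : Int) :
    (PySem.List.remove? (l ++ [x]) ((l ++ [x]).headD 0)).getD (l ++ [x]) = (l ++ [x]).tail := by
  cases l with
  | nil => simp
  | cons a as => simp [PySem.List.remove?_cons_self]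

-- the sliding step on the window: tail of (suffix ++ [x]) is the new suffix
theorem pvWindowSlide (L : List Int) (x : Int) (m : Nat) (hm : m ≤ L.length) :
    (L.drop m ++ [x]).tail = (L ++ [x]).drop (m + 1) := by
  rcases Nat.eq_or_lt_of_le hm with h | h
  · subst h; simp
  · rw [List.drop_eq_getElem_cons h]
    simp only [List.cons_append, List.tail_cons]
    rw [List.drop_append_of_le_length (by omega)]

-- b < 0: A never sees len(lista) == b, the model always counts; both count every element
theorem pvNegCase (b : Int) (hb : b < 0) :
    ∀ (l : List Int) (lista : List Int) (d : PySem.Dict Int Int) (t : Int),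
      0 ≤ t → (∀ y, d.getD y (-1) ≤ t) →
      (l.foldl (pvStepA b) (lista, t)).2 = (l.foldl (pvStepM b) (d, t)).2 := by
  intro l
  induction l with
  | nil => intro _ _ _ _ _; rfl
  | cons x xs ih =>
    intro lista d t ht hd
    have hA : pvStepA b (lista, t) x = (lista ++ [x], t + 1) := by
      unfold pvStepA; rw [if_neg (by simp; omega)]
    have hB : pvStepM b (d, t) x = (d.insert x (t + 1), t + 1) := by
      unfold pvStepM
      refine if_pos (Or.inr ?_)
      show d.getD x (-1) ≤ t - b
      have := hd x; omega
    simp only [List.foldl_cons, hA, hB]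
    apply ih _ _ _ (by omega)
    intro y
    rw [PySem.Dict.getD_insert]
    split
    · omega
    · have := hd y; omega

-- 0 ≤ b: invariant — A's window is the suffix of the counted sequence L of length b,
-- and the model dict maps y to its last counted event index (default -1), expressed as:
-- d.getD y (-1) ≤ |L| - k  ↔  y is not among the last k counted elements.
theorem pvPosCase (b : Int) (hb : 0 ≤ b) :
    ∀ (l : List Int) (L : List Int) (d : PySem.Dict Int Int),
      (∀ y, d.getD y (-1) ≤ (L.length : Int)) →
      (∀ (y : Int) (k : Nat), k ≤ L.length →
        (d.getD y (-1) ≤ (L.length : Int) - (k : Int) ↔ y ∉ L.drop (L.length - k))) →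
      (l.foldl (pvStepA b) (L.drop (L.length - b.toNat), (L.length : Int))).2
        = (l.foldl (pvStepM b) (d, (L.length : Int))).2 := by
  intro l
  induction l with
  | nil => intro _ _ _ _; rfl
  | cons x xs ih =>
    intro L d hub hinv
    have hbb : (b.toNat : Int) = b := Int.toNat_of_nonneg hb
    -- common re-establishment of the invariant after counting x (new L is L ++ [x])
    have hub' : ∀ y, (d.insert x ((L.length : Int) + 1)).getD y (-1) ≤ ((L ++ [x]).length : Int) := by
      intro y
      rw [PySem.Dict.getD_insert]
      simp only [List.length_append, List.length_cons, List.length_nil]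
      split
      · push_cast; omega
      · have := hub y; push_cast; omega
    have hinv' : ∀ (y : Int) (k : Nat), k ≤ (L ++ [x]).length →
        ((d.insert x ((L.length : Int) + 1)).getD y (-1) ≤ ((L ++ [x]).length : Int) - (k : Int)
          ↔ y ∉ (L ++ [x]).drop ((L ++ [x]).length - k)) := by
      intro y k hk
      simp only [List.length_append, List.length_cons, List.length_nil] at hk ⊢
      have hk' : k ≤ L.length + 1 := by omega
      rcases Nat.eq_zero_or_pos k with hk0 | hkpos
      · subst hk0
        rw [show L.length + (0 + 1) - 0 = L.length + 1 from rfl,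
            List.drop_eq_nil_of_le (by simp)]
        simp only [List.not_mem_nil, not_false_iff, iff_true]
        have := hub' y
        simp only [List.length_append, List.length_cons, List.length_nil] at this
        push_cast at this ⊢
        omega
      · have hdrop : (L ++ [x]).drop (L.length + (0 + 1) - k) = L.drop (L.length - (k - 1)) ++ [x] := by
          rw [show L.length + (0 + 1) - k = L.length + 1 - k from rfl,
              List.drop_append_of_le_length (by omega),
              show L.length - (k - 1) = L.length + 1 - k by omega]
        rw [hdrop]
        rw [PySem.Dict.getD_insert]
        split
        · rename_i hy
          subst hy
          constructor
          · intro h; exfalso; push_cast at h; omega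
          · intro h; exfalso; exact h (by simp)
        · rename_i hy
          have hiff := hinv y (k - 1) (by omega)
          simp only [List.mem_append, List.mem_singleton, not_or]
          constructor
          · intro h
            refine ⟨(hiff.mp ?_), hy⟩
            push_cast at h ⊢; omega
          · intro h
            have := hiff.mpr h.1
            push_cast at this ⊢; omega
    by_cases hfill : L.length < b.toNat
    -- filling phase
    · have hA : pvStepA b (L.drop (L.length - b.toNat), (L.length : Int)) x
          = (L ++ [x], (L.length : Int) + 1) := by
        unfold pvStepA
        have h0 : L.length - b.toNat = 0 := by omega
        rw [h0, List.drop_zero]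
        refine if_neg ?_
        show ¬ ((L.length : Int) = b)
        omega
      have hB : pvStepM b (d, (L.length : Int)) x
          = (d.insert x ((L.length : Int) + 1), (L.length : Int) + 1) := by
        unfold pvStepM
        refine if_pos (Or.inl ?_)
        show (L.length : Int) < b
        omega
      simp only [List.foldl_cons, hA, hB]
      have := ih (L ++ [x]) (d.insert x ((L.length : Int) + 1)) hub' hinv'
      have hwin : (L ++ [x]).drop ((L ++ [x]).length - b.toNat) = L ++ [x] := by
        have : (L ++ [x]).length - b.toNat = 0 := by simp; omega
        rw [this, List.drop_zero]
      rw [hwin] at this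
      simpa using this
    -- window full
    · replace hfill := Nat.le_of_not_lt hfill
      have hlen : (L.drop (L.length - b.toNat)).length = b.toNat := by
        rw [List.length_drop]; omega
      have hmem : x ∈ L.drop (L.length - b.toNat) ↔ ¬ (d.getD x (-1) ≤ (L.length : Int) - b) := by
        have := hinv x b.toNat (by omega)
        rw [hbb] at this
        constructor
        · intro h hc; exact (this.mp hc) h
        · intro h; by_contra hnot; exact h (this.mpr hnot)
      by_cases hin : x ∈ L.drop (L.length - b.toNat)
      -- not counted: both states unchanged
      · have hA : pvStepA b (L.drop (L.length - b.toNat), (L.length : Int)) x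
            = (L.drop (L.length - b.toNat), (L.length : Int)) := by
          unfold pvStepA
          rw [if_pos (show ((L.drop (L.length - b.toNat)).length : Int) = b by rw [hlen]; exact hbb),
              if_pos hin]
        have hB : pvStepM b (d, (L.length : Int)) x = (d, (L.length : Int)) := by
          unfold pvStepM
          refine if_neg ?_
          show ¬ ((L.length : Int) < b ∨ d.getD x (-1) ≤ (L.length : Int) - b)
          have := hmem.mp hin
          omega
        simp only [List.foldl_cons, hA, hB]
        exact ih L d hub hinv
      -- counted: window slides, event recorded
      · have hA : pvStepA b (L.drop (L.length - b.toNat), (L.length : Int)) x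
            = ((L ++ [x]).drop ((L ++ [x]).length - b.toNat), (L.length : Int) + 1) := by
          unfold pvStepA
          rw [if_pos (show ((L.drop (L.length - b.toNat)).length : Int) = b by rw [hlen]; exact hbb),
              if_neg hin]
          simp only
          rw [pvRemoveHead, pvWindowSlide _ _ _ (by omega)]
          congr 2
          simp; omega
        have hB : pvStepM b (d, (L.length : Int)) x
            = (d.insert x ((L.length : Int) + 1), (L.length : Int) + 1) := by
          unfold pvStepM
          refine if_pos (Or.inr ?_)
          show d.getD x (-1) ≤ (L.length : Int) - b
          by_contra hc
          exact hin (hmem.mpr hc)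
        simp only [List.foldl_cons, hA, hB]
        have := ih (L ++ [x]) (d.insert x ((L.length : Int) + 1)) hub' hinv'
        simpa using this

-- bridge: the index loop over range(a) reading c[i] is a fold over the first a elements
theorem pvBridge {σ : Type} (f : σ → Int → σ) (c : List Int) (a : Int)
    (h0 : 0 < a) (hlen : a ≤ (c.length : Int)) (init : σ) :
    (PySem.List.pyRange 0 a 1).foldl (fun st i => f st (PySem.List.pyGetD c i 0)) init
      = (c.take a.toNat).foldl f init := by
  have hlen' : ((c.take a.toNat).length : Int) = a := by
    simp [List.length_take]; omega
  rw [show (PySem.List.pyRange 0 a 1) = PySem.List.pyRange 0 ((c.take a.toNat).length : Int) 1 by rw [hlen']]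
  rw [PySem.List.foldl_congr_mem' (g := fun st i => f st (PySem.List.pyGetD (c.take a.toNat) i 0))]
  · exact PySem.List.foldl_pyRange_zero_pyGetD' (c.take a.toNat) 0 f init
  · intro i hi st
    rw [PySem.List.mem_pyRange_one] at hi
    rw [hlen'] at hi
    congr 1
    rw [PySem.List.pyGetD_eq_getElem c 0 (by omega) (by omega),
        PySem.List.pyGetD_eq_getElem (c.take a.toNat) 0 (by omega) (by rw [hlen']; omega)]
    simp [List.getElem_take]

-- A (the range fold) equals the model fold, given 0 < a ≤ len c
theorem pvAeqM (b : Int) (c : List Int) (a : Int) (h0 : 0 < a) (hlen : a ≤ (c.length : Int)) :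
    ((PySem.List.pyRange 0 a 1).foldl (fun st i => pvStepA b st (PySem.List.pyGetD c i 0)) ([], 0)).2
      = ((PySem.List.pyRange 0 a 1).foldl (fun st i => pvStepM b st (PySem.List.pyGetD c i 0)) (PySem.Dict.empty, 0)).2 := by
  rw [pvBridge (pvStepA b) c a h0 hlen, pvBridge (pvStepM b) c a h0 hlen]
  by_cases hb : 0 ≤ b
  · have := pvPosCase b hb (c.take a.toNat) [] PySem.Dict.empty
      (by intro y; simp [PySem.Dict.getD_empty])
      (by intro y k hk
          have hk0 : k = 0 := by simpa using hk
          subst hk0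
          simp [PySem.Dict.getD_empty])
    simpa using this
  · replace hb := Int.not_le.mp hb
    exact pvNegCase b hb (c.take a.toNat) [] PySem.Dict.empty 0 le_rfl
      (by intro y; simp [PySem.Dict.getD_empty])

-- ===== B-side lemmas =====

-- last occurrence index of y among positions 0..k-1 (or -1)
def pvLastIdx (c : List Int) : Nat → Int → Int
  | 0, _ => -1
  | k+1, y => if PySem.List.pyGetD c (k : Int) 0 = y then (k : Int) else pvLastIdx c k y

theorem pvLastIdx_bounds (c : List Int) (k : Nat) (y : Int) :
    -1 ≤ pvLastIdx c k y ∧ pvLastIdx c k y < (k : Int) := by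
  induction k with
  | zero => simp [pvLastIdx]
  | succ n ih =>
    unfold pvLastIdx
    split
    · push_cast; omega
    · push_cast; omega

theorem pvGetDAppendLt (l : List Int) (v j : Int) (h0 : 0 ≤ j) (h1 : j < (l.length : Int)) :
    PySem.List.pyGetD (l ++ [v]) j 0 = PySem.List.pyGetD l j 0 := by
  rw [PySem.List.pyGetD_eq_getElem _ _ h0 (by simp; omega),
      PySem.List.pyGetD_eq_getElem _ _ h0 h1]
  rw [List.getElem_append_left (by omega)]

theorem pvGetDAppendEnd (l : List Int) (v : Int) :
    PySem.List.pyGetD (l ++ [v]) (l.length : Int) 0 = v := by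
  rw [PySem.List.pyGetD_eq_getElem _ _ (by positivity) (by simp)]
  simp

-- pass 1 computes the predecessor links and 'seen' is the last-occurrence map
theorem pvP1 (c : List Int) (k : Nat) :
    ((PySem.List.pyRange 0 (k : Int) 1).foldl (pvLink c) ([], PySem.Dict.empty)).1.length = k ∧
    (∀ i : Nat, i < k →
      PySem.List.pyGetD ((PySem.List.pyRange 0 (k : Int) 1).foldl (pvLink c) ([], PySem.Dict.empty)).1 (i : Int) 0
        = pvLastIdx c i (PySem.List.pyGetD c (i : Int) 0)) ∧
    (∀ y, ((PySem.List.pyRange 0 (k : Int) 1).foldl (pvLink c) ([], PySem.Dict.empty)).2.getD y (-1)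
        = pvLastIdx c k y) := by
  induction k with
  | zero =>
    refine ⟨rfl, by omega, ?_⟩
    intro y
    simp [PySem.List.pyRange_one_eq_nil (by omega : (0:Int) ≤ 0), pvLastIdx, PySem.Dict.getD_empty]
  | succ n ih =>
    obtain ⟨ihlen, ihidx, ihdict⟩ := ih
    have hsplit : PySem.List.pyRange 0 ((n + 1 : Nat) : Int) 1
        = PySem.List.pyRange 0 (n : Int) 1 ++ [(n : Int)] := by
      push_cast
      exact PySem.List.pyRange_one_succ_right (by positivity)
    rw [hsplit, List.foldl_append]
    set S := (PySem.List.pyRange 0 (n : Int) 1).foldl (pvLink c) ([], PySem.Dict.empty) with hS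
    simp only [List.foldl_cons, List.foldl_nil]
    refine ⟨by simp [pvLink, ihlen], ?_, ?_⟩
    · intro i hi
      rcases Nat.lt_succ_iff_lt_or_eq.mp hi with h | h
      · show PySem.List.pyGetD (S.1 ++ [S.2.getD (PySem.List.pyGetD c (n : Int) 0) (-1)]) (i : Int) 0 = _
        rw [pvGetDAppendLt _ _ _ (by positivity) (by rw [ihlen]; exact_mod_cast h)]
        exact ihidx i h
      · subst h
        show PySem.List.pyGetD (S.1 ++ [S.2.getD (PySem.List.pyGetD c (i : Int) 0) (-1)]) (i : Int) 0 = _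
        rw [show ((i : Nat) : Int) = (S.1.length : Int) by rw [ihlen], pvGetDAppendEnd]
        rw [ihdict]
    · intro y
      show (S.2.insert (PySem.List.pyGetD c (n : Int) 0) (n : Int)).getD y (-1) = _
      rw [PySem.Dict.getD_insert]
      unfold pvLastIdx
      split
      · rename_i h
        rw [if_pos h.symm]
      · rename_i h
        rw [if_neg (fun hc => h hc.symm)]
        exact ihdict y

-- pass 2 agrees with the model: same counter, and the model dict reads off the ev array
-- through the predecessor links
theorem pvP2 (b : Int) (c prev : List Int)
    (hprev : ∀ i : Nat, i < prev.length →
      PySem.List.pyGetD prev (i : Int) 0 = pvLastIdx c i (PySem.List.pyGetD c (i : Int) 0)) :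
    ∀ k : Nat, k ≤ prev.length →
    ((PySem.List.pyRange 0 (k : Int) 1).foldl (pvChase b prev) ([], 0)).1.length = k ∧
    ((PySem.List.pyRange 0 (k : Int) 1).foldl (pvChase b prev) ([], 0)).2
      = ((PySem.List.pyRange 0 (k : Int) 1).foldl (fun st i => pvStepM b st (PySem.List.pyGetD c i 0)) (PySem.Dict.empty, 0)).2 ∧
    (∀ y,
      ((PySem.List.pyRange 0 (k : Int) 1).foldl (fun st i => pvStepM b st (PySem.List.pyGetD c i 0)) (PySem.Dict.empty, 0)).1.getD y (-1)
        = if pvLastIdx c k y < 0 then -1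
          else PySem.List.pyGetD ((PySem.List.pyRange 0 (k : Int) 1).foldl (pvChase b prev) ([], 0)).1 (pvLastIdx c k y) 0) := by
  intro k
  induction k with
  | zero =>
    intro _
    refine ⟨rfl, rfl, ?_⟩
    intro y
    simp [PySem.List.pyRange_one_eq_nil (by omega : (0:Int) ≤ 0), pvLastIdx, PySem.Dict.getD_empty]
  | succ n ih =>
    intro hk
    obtain ⟨ihlen, iht, ihdict⟩ := ih (by omega)
    have hsplit : PySem.List.pyRange 0 ((n + 1 : Nat) : Int) 1
        = PySem.List.pyRange 0 (n : Int) 1 ++ [(n : Int)] := by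
      push_cast
      exact PySem.List.pyRange_one_succ_right (by positivity)
    rw [hsplit, List.foldl_append, List.foldl_append]
    set S := (PySem.List.pyRange 0 (n : Int) 1).foldl (pvChase b prev) ([], 0) with hSdef
    set M := (PySem.List.pyRange 0 (n : Int) 1).foldl (fun st i => pvStepM b st (PySem.List.pyGetD c i 0)) (PySem.Dict.empty, 0) with hMdef
    simp only [List.foldl_cons, List.foldl_nil]
    set x := PySem.List.pyGetD c (n : Int) 0 with hx
    have hj : PySem.List.pyGetD prev (n : Int) 0 = pvLastIdx c n x := hprev n (by omega)
    have hlast : (if PySem.List.pyGetD prev (n : Int) 0 < 0 then (-1 : Int)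
        else PySem.List.pyGetD S.1 (PySem.List.pyGetD prev (n : Int) 0) 0) = M.1.getD x (-1) := by
      rw [hj, ihdict x]
    have hchase : pvChase b prev S (n : Int) = pvChaseLast b S (M.1.getD x (-1)) := by
      unfold pvChase
      rw [hlast]
    have hSL : pvChaseLast b S (M.1.getD x (-1))
        = (if M.2 < b ∨ M.1.getD x (-1) ≤ M.2 - b
           then (S.1 ++ [M.2 + 1], M.2 + 1)
           else (S.1 ++ [M.1.getD x (-1)], M.2)) := by
      unfold pvChaseLast
      rw [iht]
    have hstep : pvStepM b M x
        = (if M.2 < b ∨ M.1.getD x (-1) ≤ M.2 - b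
           then (M.1.insert x (M.2 + 1), M.2 + 1) else M) := rfl
    rw [hchase, hSL, hstep]
    -- common preservation of earlier ev entries
    have hpres : ∀ (v : Int) (y : Int), ¬ pvLastIdx c n y < 0 →
        PySem.List.pyGetD (S.1 ++ [v]) (pvLastIdx c n y) 0 = PySem.List.pyGetD S.1 (pvLastIdx c n y) 0 := by
      intro v y hy
      have hb := pvLastIdx_bounds c n y
      exact pvGetDAppendLt _ _ _ (by omega) (by rw [ihlen]; omega)
    have hnn : ¬ ((n : Int) < 0) := by omega
    have hSn : ((n : Nat) : Int) = (S.1.length : Int) := by rw [ihlen]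
    by_cases hcond : M.2 < b ∨ M.1.getD x (-1) ≤ M.2 - b
    · rw [if_pos hcond, if_pos hcond]
      refine ⟨by simp [ihlen], rfl, ?_⟩
      intro y
      by_cases hxy : y = x
      · have hL : pvLastIdx c (n + 1) y = (n : Int) := by
          unfold pvLastIdx
          rw [if_pos (by rw [← hx, hxy])]
        rw [hL, PySem.Dict.getD_insert, if_pos hxy, if_neg hnn, hSn, pvGetDAppendEnd]
      · have hL : pvLastIdx c (n + 1) y = pvLastIdx c n y := by
          rw [show pvLastIdx c (n + 1) y
                = if PySem.List.pyGetD c (n : Int) 0 = y then (n : Int) else pvLastIdx c n y from rfl,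
              if_neg (by intro hc; exact hxy (by rw [hx, hc]))]
        rw [hL, PySem.Dict.getD_insert, if_neg hxy, ihdict y]
        by_cases hneg : pvLastIdx c n y < 0
        · rw [if_pos hneg, if_pos hneg]
        · rw [if_neg hneg, if_neg hneg, hpres _ y hneg]
    · rw [if_neg hcond, if_neg hcond]
      refine ⟨by simp [ihlen], rfl, ?_⟩
      intro y
      by_cases hxy : y = x
      · have hL : pvLastIdx c (n + 1) y = (n : Int) := by
          unfold pvLastIdx
          rw [if_pos (by rw [← hx, hxy])]
        rw [hL, if_neg hnn, hSn, pvGetDAppendEnd, hxy]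
      · have hL : pvLastIdx c (n + 1) y = pvLastIdx c n y := by
          rw [show pvLastIdx c (n + 1) y
                = if PySem.List.pyGetD c (n : Int) 0 = y then (n : Int) else pvLastIdx c n y from rfl,
              if_neg (by intro hc; exact hxy (by rw [hx, hc]))]
        rw [hL, ihdict y]
        by_cases hneg : pvLastIdx c n y < 0
        · rw [if_pos hneg, if_pos hneg]
        · rw [if_neg hneg, if_neg hneg, hpres _ y hneg]

-- ===== VERDICT (by name: the statement is the Claim_ definition above) =====
theorem is_in_previous_elements_spec : Claim_equal_is_in_previous_elements := by
  intro a b c _ hpre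
  unfold Spec_is_in_previous_elements is_in_previous_elements is_in_previous_elements_alt
  by_cases hab : a ≤ b
  · rw [if_pos hab, if_pos hab]
  · rw [if_neg hab, if_neg hab]
    have hlen : a ≤ (c.length : Int) := by
      rcases hpre with h | h
      · exact absurd h hab
      · exact h
    by_cases ha : a ≤ 0
    · rw [PySem.List.pyRange_one_eq_nil ha]
      rfl
    · replace ha := Int.not_le.mp ha
      have hNa : ((a.toNat : Nat) : Int) = a := Int.toNat_of_nonneg (by omega)
      rw [← hNa]
      obtain ⟨hplen, hpidx, _⟩ := pvP1 c a.toNat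
      obtain ⟨_, ht, _⟩ := pvP2 b c
        ((PySem.List.pyRange 0 ((a.toNat : Nat) : Int) 1).foldl (pvLink c) ([], PySem.Dict.empty)).1
        (by intro i hi; exact hpidx i (by rwa [hplen] at hi))
        a.toNat (by rw [hplen])
      rw [ht, hNa]
      exact pvAeqM b c a ha hlen
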